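-- pv_equiv track=rewrite | github.com/jnsquire/dapper | dapper/adapter/subprocess_manager.py | _analyze_python_invocation
-- ===== SOURCE A (Python) =====
-- PYTHON_INVOCATION_MIN_ARGS = 2
--
-- def _analyze_python_invocation(args: list[str]) -> tuple[str, str, list[str]] | None:
--     """Analyze a Python invocation into mode/value/rest tuple.
--
--     Returns:
--         ("program", script_path, trailing_args)
--         ("module", module_name, trailing_args)
--         ("code", code_string, trailing_args)
--         or None if invocation shape is unsupported.
--     """
--     result: tuple[str, str, list[str]] | None = None
--     if len(args) < PYTHON_INVOCATION_MIN_ARGS: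
--         return result
--
--     index = 1
--     while index < len(args) and result is None:
--         current = args[index]
--
--         if current == "--":
--             if index + 1 < len(args):
--                 result = ("program", args[index + 1], args[index + 2 :])
--             break
--
--         if current == "-m":
--             if index + 1 < len(args):
--                 result = ("module", args[index + 1], args[index + 2 :])
--             break
--
--         if current == "-c":
--             if index + 1 < len(args):
--                 result = ("code", args[index + 1], args[index + 2 :])
--             break
--
--         if current == "-":
--             break
--
--         if current.startswith("-"):
--             index += 1
--             continue
--
--         result = ("program", current, args[index + 1 :])
--
--     return result
-- ===== SOURCE B (Python) =====
-- PYTHON_INVOCATION_MIN_ARGS = 2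
--
-- _FLAG_MODES = {"--": "program", "-m": "module", "-c": "code"}
--
-- def _analyze_python_invocation(args):
--     """Structural recursion over successive tails of args[1:] instead of an
--     index-driven while loop over the original list."""
--     if len(args) < PYTHON_INVOCATION_MIN_ARGS:
--         return None
--     return _dispatch(args[1:])
--
-- def _dispatch(rest):
--     if not rest:
--         return None
--     head, *tail = rest
--     mode = _FLAG_MODES.get(head)
--     if mode is not None:
--         return (mode, tail[0], tail[1:]) if tail else None
--     if head == "-":
--         return None
--     if head.startswith("-"):
--         return _dispatch(tail)
--     return ("program", head, tail)
-- ===== Notes on version B (the rewrite author's own statement) =====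
-- stated objective: alternative
-- what changed: Replaces A's index-driven while loop with break/result sentinels over the original list by structural recursion over successive tails of args[1:]: head/tail destructuring with a direct-return dispatch and a recursive call for unrecognized flags.
import Mathlib
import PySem

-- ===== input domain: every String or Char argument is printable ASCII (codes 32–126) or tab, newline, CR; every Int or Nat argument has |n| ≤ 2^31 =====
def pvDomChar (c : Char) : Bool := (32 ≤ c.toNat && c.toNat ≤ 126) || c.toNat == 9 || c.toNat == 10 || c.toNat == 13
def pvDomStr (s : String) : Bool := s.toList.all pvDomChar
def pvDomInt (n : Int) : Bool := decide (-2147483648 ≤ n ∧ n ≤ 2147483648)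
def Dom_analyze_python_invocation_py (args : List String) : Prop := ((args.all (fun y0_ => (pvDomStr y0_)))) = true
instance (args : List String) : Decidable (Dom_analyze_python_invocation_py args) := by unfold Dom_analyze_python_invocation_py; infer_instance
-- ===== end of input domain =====

set_option maxRecDepth 4000


-- B replaces A's index-driven while loop by structural recursion over tails of args[1:]; objective: alternative.

-- ===== PORT A =====
-- A's while loop: index runs from 1; `break`/`result` endings become direct returns of the
-- branch's value.  args[index] with index < len(args) is in range, so List.getD is exact,
-- and args[index+1:] / args[index+2:] with nonnegative bounds are List.drop (PySem slice_from).
def pyA_loop (args : List String) (index : Nat) : Option (String × String × List String) :=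
  if h : index < args.length then
    let current := args.getD index ""
    if current = "--" then
      if index + 1 < args.length then some ("program", args.getD (index + 1) "", args.drop (index + 2)) else none
    else if current = "-m" then
      if index + 1 < args.length then some ("module", args.getD (index + 1) "", args.drop (index + 2)) else none
    else if current = "-c" then
      if index + 1 < args.length then some ("code", args.getD (index + 1) "", args.drop (index + 2)) else none
    else if current = "-" then
      none
    else if PySem.Str.startswith current "-" then
      pyA_loop args (index + 1)
    else
      some ("program", current, args.drop (index + 1))
  else none
termination_by args.length - index

def analyze_python_invocation_py (args : List String) : Option (String × String × List String) :=
  if args.length < 2 then none else pyA_loop args 1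

-- ===== PORT B =====
-- Source B's _FLAG_MODES dict (three fixed keys; lookup transliterated as a first-match chain).
def altMode (t : String) : Option String :=
  if t = "--" then some "program" else if t = "-m" then some "module" else if t = "-c" then some "code" else none

-- Source B's _dispatch: structural recursion on the rest-of-args list, head/tail destructuring.
-- tail[0] on a nonempty tail is List.getD 0, tail[1:] is List.drop 1.
def altDispatch : List String → Option (String × String × List String)
  | [] => none
  | head :: tail =>
    match altMode head with
    | some mode => if tail = [] then none else some (mode, tail.getD 0 "", tail.drop 1)
    | none =>
      if head = "-" then none
      else if PySem.Str.startswith head "-" then altDispatch tail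
      else some ("program", head, tail)

def analyze_python_invocation_py_alt (args : List String) : Option (String × String × List String) :=
  if args.length < 2 then none else altDispatch (args.drop 1)

-- ===== PRECONDITION & SPEC =====
def Spec_analyze_python_invocation_py (args : List String) (out : Option (String × String × List String)) : Prop := out = analyze_python_invocation_py_alt args
instance (args : List String) (out : Option (String × String × List String)) : Decidable (Spec_analyze_python_invocation_py args out) := by unfold Spec_analyze_python_invocation_py; infer_instance

-- ===== CLAIM =====
def Claim_equal_analyze_python_invocation_py : Prop := ∀ (args : List String), Dom_analyze_python_invocation_py args → Spec_analyze_python_invocation_py args (analyze_python_invocation_py args)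

-- ===== LEMMAS AND PROOFS =====

theorem loop_eq_dispatch (args : List String) :
    ∀ (n index : Nat), args.length - index ≤ n →
      pyA_loop args index = altDispatch (args.drop index) := by
  intro n
  induction n with
  | zero =>
    intro index h
    have hge : args.length ≤ index := by omega
    rw [pyA_loop, List.drop_eq_nil_of_le hge]
    simp [dif_neg (by omega : ¬ index < args.length), altDispatch]
  | succ n ih =>
    intro index h
    by_cases hlt : index < args.length
    · have hdrop : args.drop index = args[index] :: args.drop (index + 1) :=
        List.drop_eq_getElem_cons hlt
      have hget : args.getD index "" = args[index] := List.getD_eq_getElem args "" hlt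
      rw [pyA_loop, dif_pos hlt, hdrop]
      simp only [altDispatch, altMode, hget]
      have htail : (args.drop (index + 1) = []) ↔ args.length ≤ index + 1 :=
        List.drop_eq_nil_iff
      by_cases h1 : args[index] = "--"
      · simp only [if_pos h1]
        by_cases h2 : index + 1 < args.length
        · have hne : ¬ args.drop (index + 1) = [] := by rw [htail]; omega
          have hd2 : args.drop (index + 1) = args[index+1] :: args.drop (index + 2) :=
            List.drop_eq_getElem_cons h2
          rw [if_pos h2, if_neg hne, hd2, List.getD_eq_getElem args "" h2]; rfl
        · have he : args.drop (index + 1) = [] := by rw [htail]; omega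
          rw [if_neg h2, if_pos he]
      · by_cases h2m : args[index] = "-m"
        · simp only [if_neg h1, if_pos h2m]
          by_cases h2 : index + 1 < args.length
          · have hne : ¬ args.drop (index + 1) = [] := by rw [htail]; omega
            have hd2 : args.drop (index + 1) = args[index+1] :: args.drop (index + 2) :=
              List.drop_eq_getElem_cons h2
            rw [if_pos h2, if_neg hne, hd2, List.getD_eq_getElem args "" h2]; rfl
          · have he : args.drop (index + 1) = [] := by rw [htail]; omega
            rw [if_neg h2, if_pos he]
        · by_cases h2c : args[index] = "-c"
          · simp only [if_neg h1, if_neg h2m, if_pos h2c]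
            by_cases h2 : index + 1 < args.length
            · have hne : ¬ args.drop (index + 1) = [] := by rw [htail]; omega
              have hd2 : args.drop (index + 1) = args[index+1] :: args.drop (index + 2) :=
                List.drop_eq_getElem_cons h2
              rw [if_pos h2, if_neg hne, hd2, List.getD_eq_getElem args "" h2]; rfl
            · have he : args.drop (index + 1) = [] := by rw [htail]; omega
              rw [if_neg h2, if_pos he]
          · simp only [if_neg h1, if_neg h2m, if_neg h2c]
            by_cases h4 : args[index] = "-"
            · simp [h4]
            · simp only [if_neg h4]
              split_ifs with h5
              · exact ih (index + 1) (by omega)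
              · rfl
    · rw [pyA_loop]
      rw [List.drop_eq_nil_of_le (by omega : args.length ≤ index)]
      simp [dif_neg hlt, altDispatch]

-- ===== VERDICT =====
theorem analyze_python_invocation_py_spec : Claim_equal_analyze_python_invocation_py := by
  intro args _
  unfold Spec_analyze_python_invocation_py analyze_python_invocation_py analyze_python_invocation_py_alt
  by_cases h : args.length < 2
  · simp [h]
  · simp [h, loop_eq_dispatch args args.length 1 (by omega)]
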